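-- pv_equiv track=rewrite | github.com/codesquad-backend-study/algorithm-study | 모의고사/2018_KAKAO_BLIND_RECRUITMENT/자동완성.py | solution
-- ===== SOURCE A (Python) =====
-- def solution(words):
--     root = ["root", {}, False]  # 트라이 만들기
--     for word in words:
--         cur = root
--         for ch in word:
--             if ch not in cur[1]:
--                 node = [ch, {}, False]
--                 cur[1][ch] = node
--             cur = cur[1][ch]
--         cur[2] = word
--
--     ans = 0
--     for word in words:  # 트라이에서 모든 단어 검색
--         cur = root
--         cnt = 0
--         for idx, ch in enumerate(word):
--             if len(cur[1]) > 1:  # 트라이가 갈라지면, 해당 인덱스 + 1 까지 입력해야함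
--                 cnt = idx + 1
--             if cur[2]:  # 검색도중 단어값을 지나치면, 해당 단어 인덱스 + 1 까지 입력해야함
--                 cnt = idx + 1
--             cur = cur[1][ch]
--
--         if len(cur[1]) > 0:  # 단어를 찾았는데, 해당 단어를 포함하는 더 긴 단어가 있으면 해당 단어를 모두 입력해야함
--             cnt = len(word)
--
--         ans += cnt
--
--     return ans
-- ===== SOURCE B (Python) =====
-- def solution(words):
--     # Pairwise-LCP reformulation: a word's typed count is min(len(w), 1 + max
--     # common-prefix length with any other distinct non-empty word value).
--     def lcp(a, b):
--         n = 0
--         for x, y in zip(a, b):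
--             if x != y:
--                 break
--             n += 1
--         return n
--
--     others = set(words) - {""}
--     total = 0
--     for w in words:
--         best = -1
--         for u in others:
--             if u != w:
--                 l = lcp(w, u)
--                 if l > best:
--                     best = l
--         total += min(len(w), best + 1)
--     return total
-- ===== Notes on version B (the rewrite author's own statement) =====
-- stated objective: alternative
-- what changed: Replaces the trie build + per-word trie walk with a direct pairwise formulation: each word's typed count is min(len(w), 1 + max common-prefix length with any other distinct non-empty word value), computed over set(words) - {""}.
import Mathlib
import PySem

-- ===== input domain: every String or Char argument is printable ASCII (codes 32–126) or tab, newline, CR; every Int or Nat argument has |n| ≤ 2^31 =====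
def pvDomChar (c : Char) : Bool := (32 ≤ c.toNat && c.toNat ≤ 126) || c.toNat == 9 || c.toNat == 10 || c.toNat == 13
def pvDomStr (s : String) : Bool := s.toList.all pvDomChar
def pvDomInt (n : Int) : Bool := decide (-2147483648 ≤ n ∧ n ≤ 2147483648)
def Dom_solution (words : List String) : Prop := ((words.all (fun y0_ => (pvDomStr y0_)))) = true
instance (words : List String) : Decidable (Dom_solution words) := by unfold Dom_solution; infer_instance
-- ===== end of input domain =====

-- B replaces A's trie with a direct pairwise max-common-prefix computation (alternative algorithm, same value).

-- ===== PORT A =====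
-- Python node ["root"/ch, {children}, word_or_False]: the first slot is never read, so it is dropped;
-- the children dict is an insertion-ordered association list, the third slot is `Option String`
-- (none = False; Python's `if cur[2]:` is `termB` below, where "" is falsy).
mutual
inductive PTrie where
  | mk (kids : PKids) (term : Option String)
inductive PKids where
  | nil
  | cons (c : Char) (t : PTrie) (rest : PKids)
end

def PTrie.kids : PTrie → PKids | .mk k _ => k
def PTrie.term : PTrie → Option String | .mk _ t => t

-- dict lookup cur[1].get(ch)
def PKids.find? : PKids → Char → Option PTrie
  | .nil, _ => none
  | .cons d t rest, c => if c = d then some t else PKids.find? rest c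

-- len(cur[1])
def PKids.size : PKids → Nat
  | .nil => 0
  | .cons _ _ rest => PKids.size rest + 1

-- cur[1][ch] = node : overwrite in place if present, else append (dict insertion order)
def PKids.set : PKids → Char → PTrie → PKids
  | .nil, c, t => .cons c t .nil
  | .cons d t0 rest, c, t => if c = d then .cons d t rest else .cons d t0 (PKids.set rest c t)

-- A's inner insertion loop (walk down `word`, creating missing children), then `cur[2] = word`
def insertChars : PTrie → List Char → String → PTrie
  | t, [], w => .mk t.kids (some w)
  | t, c :: rest, w =>
      let child := match t.kids.find? c with
        | some n => n
        | none => PTrie.mk .nil none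
      .mk (t.kids.set c (insertChars child rest w)) t.term

def buildTrie (words : List String) : PTrie :=
  words.foldl (fun r w => insertChars r w.toList w) (PTrie.mk .nil none)

-- Python truthiness of cur[2] (False, or a string where "" is falsy)
def termB (t : PTrie) : Bool := match t.term with | some s => s ≠ "" | none => false

-- A's search loop over `enumerate(word)` plus the trailing `len(cur[1]) > 0` check
def searchGo : PTrie → Nat → Int → Int → List Char → Int
  | cur, _, cnt, wlen, [] => if 0 < cur.kids.size then wlen else cnt
  | cur, idx, cnt, wlen, c :: rest =>
      let cnt1 := if 1 < cur.kids.size then (idx : Int) + 1 else cnt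
      let cnt2 := if termB cur then (idx : Int) + 1 else cnt1
      match cur.kids.find? c with
      | some n => searchGo n (idx + 1) cnt2 wlen rest
      | none => cnt2   -- unreachable: the word was inserted, so Python's cur[1][ch] cannot KeyError

def solution (words : List String) : Int :=
  let root := buildTrie words
  words.foldl (fun ans w => ans + searchGo root 0 0 (PySem.Str.len w) w.toList) 0

-- ===== PORT B =====
-- helper lcp of Source B (zip + break, counting leading equal pairs)
def lcpRec : List Char → List Char → Int
  | x :: xs, y :: ys => if x ≠ y then 0 else lcpRec xs ys + 1
  | _, _ => 0

def solution_alt (words : List String) : Int :=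
  let others : PySem.Set String := PySem.Set.diff (PySem.Set.ofList words) [""]
  words.foldl
    (fun total w =>
      let best := others.foldl
        (fun best u =>
          if u ≠ w then
            let l := lcpRec w.toList u.toList
            if best < l then l else best
          else best) (-1)
      total + min (PySem.Str.len w) (best + 1)) 0

-- ===== PRECONDITION & SPEC =====
def Spec_solution (words : List String) (out : Int) : Prop := out = solution_alt words
instance (words : List String) (out : Int) : Decidable (Spec_solution words out) := by unfold Spec_solution; infer_instance

-- ===== CLAIM (what is proved, stated in full; the proofs are below) =====
def Claim_equal_solution : Prop := ∀ (words : List String), Dom_solution words → Spec_solution words (solution words)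

-- ===== LEMMAS AND PROOFS =====

-- ---- the Nat-valued common-prefix length and its characterisation ----
def lcpN : List Char → List Char → Nat
  | x :: xs, y :: ys => if x = y then lcpN xs ys + 1 else 0
  | _, _ => 0

theorem lcpRec_eq (a b : List Char) : lcpRec a b = (lcpN a b : Int) := by
  induction a generalizing b with
  | nil => cases b <;> simp [lcpRec, lcpN]
  | cons x xs ih =>
    cases b with
    | nil => simp [lcpRec, lcpN]
    | cons y ys =>
      by_cases h : x = y <;> simp [lcpRec, lcpN, h, ih]

theorem lcpRec_nonneg (a b : List Char) : 0 ≤ lcpRec a b := by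
  rw [lcpRec_eq]; exact Int.natCast_nonneg _

theorem lcpN_le_left (a b : List Char) : lcpN a b ≤ a.length := by
  induction a generalizing b with
  | nil => cases b <;> simp [lcpN]
  | cons x xs ih =>
    cases b with
    | nil => simp [lcpN]
    | cons y ys =>
      by_cases h : x = y <;> simp [lcpN, h]
      exact ih ys

theorem lcpN_comm (a b : List Char) : lcpN a b = lcpN b a := by
  induction a generalizing b with
  | nil => cases b <;> simp [lcpN]
  | cons x xs ih =>
    cases b with
    | nil => simp [lcpN]
    | cons y ys =>
      by_cases h : x = y <;> simp [lcpN, h, eq_comm, ih]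

theorem lcpN_le_right (a b : List Char) : lcpN a b ≤ b.length := by
  rw [lcpN_comm]; exact lcpN_le_left b a

theorem lcpN_take (a b : List Char) : a.take (lcpN a b) = b.take (lcpN a b) := by
  induction a generalizing b with
  | nil => cases b <;> simp [lcpN]
  | cons x xs ih =>
    cases b with
    | nil => simp [lcpN]
    | cons y ys =>
      by_cases h : x = y <;> simp [lcpN, h, ih]

theorem lcpN_ge (a b : List Char) (k : Nat) (ht : a.take k = b.take k)
    (ha : k ≤ a.length) (hb : k ≤ b.length) : k ≤ lcpN a b := by
  induction a generalizing b k with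
  | nil => simp at ha; omega
  | cons x xs ih =>
    cases k with
    | zero => omega
    | succ k =>
      cases b with
      | nil => simp at hb
      | cons y ys =>
        simp only [List.take_succ_cons, List.cons.injEq] at ht
        simp only [List.length_cons] at ha hb
        simp [lcpN, ht.1]
        exact ih ys k ht.2 (by omega) (by omega)

theorem lcpN_get_ne (a b : List Char) (ha : lcpN a b < a.length) (hb : lcpN a b < b.length) :
    a[lcpN a b]? ≠ b[lcpN a b]? := by
  induction a generalizing b with
  | nil => simp at ha
  | cons x xs ih =>
    cases b with
    | nil => simp at hb
    | cons y ys =>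
      by_cases h : x = y
      · simp only [lcpN, if_pos h] at ha hb ⊢
        simpa using ih ys (by simpa using ha) (by simpa using hb)
      · simp [lcpN, h]

theorem lcpN_prefix_right (a b : List Char) (h : b <+: a) : lcpN a b = b.length := by
  refine Nat.le_antisymm (lcpN_le_right a b) ?_
  refine lcpN_ge a b b.length ?_ h.length_le (le_refl _)
  rw [List.prefix_iff_eq_take] at h
  rw [List.take_length, ← h]

theorem lcpN_prefix_left (a b : List Char) (h : a <+: b) : lcpN a b = a.length := by
  rw [lcpN_comm]; exact lcpN_prefix_right b a h

theorem get_eq_of_lt_lcpN (a b : List Char) (j : Nat) (h : j < lcpN a b) : a[j]? = b[j]? := by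
  have := lcpN_take a b
  calc a[j]? = (a.take (lcpN a b))[j]? := (List.getElem?_take_of_lt h).symm
    _ = (b.take (lcpN a b))[j]? := by rw [this]
    _ = b[j]? := List.getElem?_take_of_lt h

theorem lcpN_eq_of_ne (a b : List Char) (j : Nat) (ht : a.take j = b.take j)
    (ha : j ≤ a.length) (hb : j ≤ b.length) (hne : a[j]? ≠ b[j]?) : lcpN a b = j := by
  have hge := lcpN_ge a b j ht ha hb
  rcases Nat.lt_or_ge j (lcpN a b) with h | h
  · exact absurd (get_eq_of_lt_lcpN a b j h) hne
  · omega

-- ---- PKids bookkeeping ----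
def PKids.keys : PKids → List Char
  | .nil => []
  | .cons c _ rest => c :: PKids.keys rest

theorem find?_isSome_iff_mem_keys (k : PKids) (c : Char) :
    (k.find? c).isSome = true ↔ c ∈ k.keys := by
  match k with
  | .nil => simp [PKids.find?, PKids.keys]
  | .cons d t rest =>
    by_cases h : c = d <;> simp [PKids.find?, PKids.keys, h, find?_isSome_iff_mem_keys rest c]

theorem size_eq_keys_length (k : PKids) : k.size = k.keys.length := by
  match k with
  | .nil => rfl
  | .cons d t rest => simp [PKids.size, PKids.keys, size_eq_keys_length rest]

theorem keys_set (k : PKids) (c : Char) (t : PTrie) :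
    (k.set c t).keys = if c ∈ k.keys then k.keys else k.keys ++ [c] := by
  match k with
  | .nil => simp [PKids.set, PKids.keys]
  | .cons d t0 rest =>
    by_cases h : c = d
    · simp [PKids.set, PKids.keys, h]
    · rw [show (PKids.cons d t0 rest).set c t = .cons d t0 (rest.set c t) by
        simp [PKids.set, h]]
      simp only [PKids.keys, keys_set rest c t, List.mem_cons, h, false_or]
      split <;> simp

theorem find?_set_self (k : PKids) (c : Char) (t : PTrie) : (k.set c t).find? c = some t := by
  match k with
  | .nil => simp [PKids.set, PKids.find?]
  | .cons d t0 rest =>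
    by_cases h : c = d <;> simp [PKids.set, PKids.find?, h, find?_set_self rest c t]

theorem find?_set_ne (k : PKids) (c c' : Char) (t : PTrie) (h : c' ≠ c) :
    (k.set c t).find? c' = k.find? c' := by
  match k with
  | .nil => simp [PKids.set, PKids.find?, h]
  | .cons d t0 rest =>
    by_cases hd : c = d
    · subst hd; simp [PKids.set, PKids.find?, h]
    · by_cases hd' : c' = d <;> simp [PKids.set, PKids.find?, hd, hd', find?_set_ne rest c c' t h]

theorem size_pos_iff (k : PKids) : 0 < k.size ↔ ∃ c, (k.find? c).isSome = true := by
  rw [size_eq_keys_length]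
  constructor
  · intro h
    cases hk : k.keys with
    | nil => rw [hk] at h; simp at h
    | cons a rest => exact ⟨a, (find?_isSome_iff_mem_keys k a).mpr (by rw [hk]; simp)⟩
  · rintro ⟨c, hc⟩
    rw [find?_isSome_iff_mem_keys] at hc
    exact List.length_pos_of_mem hc

theorem one_lt_size_iff (k : PKids) (hnd : k.keys.Nodup) :
    1 < k.size ↔ ∃ c₁ c₂, c₁ ≠ c₂ ∧ (k.find? c₁).isSome = true ∧ (k.find? c₂).isSome = true := by
  rw [size_eq_keys_length]
  constructor
  · intro h
    cases hk : k.keys with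
    | nil => rw [hk] at h; simp at h
    | cons a rest =>
      cases rest with
      | nil => rw [hk] at h; simp at h
      | cons b rest2 =>
        have hab : a ≠ b := by
          rw [hk] at hnd; simp [List.nodup_cons] at hnd
          exact hnd.1.1
        refine ⟨a, b, hab, ?_, ?_⟩ <;> rw [find?_isSome_iff_mem_keys, hk] <;> simp
  · rintro ⟨c₁, c₂, hne, h1, h2⟩
    rw [find?_isSome_iff_mem_keys] at h1 h2
    rcases hk : k.keys with _ | ⟨a, _ | ⟨b, rest2⟩⟩
    · rw [hk] at h1; simp at h1
    · rw [hk] at h1 h2; simp at h1 h2; exact absurd (h1.trans h2.symm) hne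
    · simp

theorem kids_mk (k : PKids) (tm : Option String) : (PTrie.mk k tm).kids = k := rfl
theorem term_mk (k : PKids) (tm : Option String) : (PTrie.mk k tm).term = tm := rfl

-- ---- walking the trie ----
def walk : PTrie → List Char → Option PTrie
  | t, [] => some t
  | t, c :: p =>
    match PKids.find? t.kids c with
    | some n => walk n p
    | none => none

def wkids (t : PTrie) (p : List Char) (c : Char) : Prop :=
  ∃ n, walk t p = some n ∧ (PKids.find? n.kids c).isSome = true

def wterm (t : PTrie) (p : List Char) : Option String :=
  match walk t p with
  | some n => n.term
  | none => none

def KeysND (t : PTrie) : Prop := ∀ p n, walk t p = some n → n.kids.keys.Nodup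

theorem walk_snoc (p : List Char) (t : PTrie) (c : Char) :
    walk t (p ++ [c]) = (walk t p).bind (fun n => PKids.find? n.kids c) := by
  induction p generalizing t with
  | nil =>
    simp only [List.nil_append, walk, Option.bind_some]
    cases h : PKids.find? t.kids c <;> simp
  | cons d p ih =>
    simp only [List.cons_append, walk]
    cases h : PKids.find? t.kids d <;> simp [ih]

theorem wterm_empty (ps : List Char) : wterm (PTrie.mk .nil none) ps = none := by
  cases ps <;> simp [wterm, walk, term_mk, kids_mk, PKids.find?]

theorem wkids_empty (ps : List Char) (c : Char) : ¬ wkids (PTrie.mk .nil none) ps c := by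
  cases ps <;> simp [wkids, walk, kids_mk, PKids.find?]

-- (a) insertion does not change the walk off the inserted path
theorem insert_off (cs : List Char) (t : PTrie) (w : String) (p : List Char)
    (h : ¬ p <+: cs) : walk (insertChars t cs w) p = walk t p := by
  induction cs generalizing t p with
  | nil =>
    cases p with
    | nil => exact absurd List.nil_prefix h
    | cons c ps => simp [insertChars, walk, kids_mk]
  | cons d ds ih =>
    cases p with
    | nil => exact absurd List.nil_prefix h
    | cons c ps =>
      by_cases hc : c = d
      · subst hc
        have hps : ¬ ps <+: ds := fun hp => h (List.cons_prefix_cons.mpr ⟨rfl, hp⟩)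
        cases hfind : PKids.find? t.kids c with
        | some n =>
          simp only [insertChars, hfind, walk, kids_mk, find?_set_self]
          exact ih n ps hps
        | none =>
          simp only [insertChars, hfind, walk, kids_mk, find?_set_self]
          rw [ih _ ps hps]
          cases ps with
          | nil => exact absurd List.nil_prefix hps
          | cons q qs => simp [walk, kids_mk, PKids.find?]
      · simp only [insertChars, walk, kids_mk]
        rw [find?_set_ne _ _ _ _ hc]

-- (b) on the inserted path: term and children after insertion
theorem insert_on (cs : List Char) (t : PTrie) (w : String) (p : List Char)
    (h : p <+: cs) : ∃ n', walk (insertChars t cs w) p = some n' ∧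
      n'.term = (if p = cs then some w else wterm t p) ∧
      (∀ c, (PKids.find? n'.kids c).isSome = true ↔ (wkids t p c ∨ p ++ [c] <+: cs)) := by
  induction cs generalizing t p with
  | nil =>
    have hp : p = [] := List.prefix_nil.mp h
    subst hp
    refine ⟨PTrie.mk t.kids (some w), rfl, by simp [term_mk], fun c => ?_⟩
    simp [kids_mk, wkids, walk]
  | cons d ds ih =>
    cases p with
    | nil =>
      refine ⟨_, rfl, ?_, fun c => ?_⟩
      · simp only [insertChars, term_mk]
        rw [if_neg (by simp), wterm]
        simp [walk]
      · simp only [insertChars, kids_mk]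
        by_cases hc : c = d
        · subst hc
          rw [find?_set_self]
          simp [List.cons_prefix_cons]
        · rw [find?_set_ne _ _ _ _ hc]
          simp only [List.nil_append]
          have : ¬ ([c] <+: d :: ds) := by
            rw [List.cons_prefix_cons]; rintro ⟨rfl, -⟩; exact hc rfl
          simp [this, wkids, walk]
    | cons c ps =>
      obtain ⟨hcd, hps⟩ := List.cons_prefix_cons.mp h
      subst hcd
      simp only [insertChars, walk, kids_mk, find?_set_self]
      cases hfind : PKids.find? t.kids c with
      | some n =>
        obtain ⟨n', hw', ht', hk'⟩ := ih n ps hps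
        refine ⟨n', by simpa using hw', ?_, fun c' => ?_⟩
        · rw [ht']
          have hwterm : wterm n ps = wterm t (c :: ps) := by
            simp [wterm, walk, hfind]
          have : (c :: ps = c :: ds) ↔ (ps = ds) := by simp
          rw [hwterm] at *
          split_ifs with h1 h2 h2 <;> first | rfl | (exfalso; simp_all)
        · rw [hk' c']
          have : wkids n ps c' ↔ wkids t (c :: ps) c' := by
            simp [wkids, walk, hfind]
          rw [this, List.cons_append, List.cons_prefix_cons]
          simp
      | none =>
        obtain ⟨n', hw', ht', hk'⟩ := ih (PTrie.mk .nil none) ps hps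
        refine ⟨n', by simpa using hw', ?_, fun c' => ?_⟩
        · rw [ht', wterm_empty]
          have : wterm t (c :: ps) = none := by simp [wterm, walk, hfind]
          rw [this]
          split_ifs with h1 h2 h2 <;> first | rfl | (exfalso; simp_all)
        · rw [hk' c']
          have h1 : ¬ wkids (PTrie.mk .nil none) ps c' := wkids_empty ps c'
          have h2 : ¬ wkids t (c :: ps) c' := by
            simp [wkids, walk, hfind]
          rw [List.cons_append, List.cons_prefix_cons]
          simp [h1, h2]

-- (c) insertion preserves duplicate-free children lists
theorem keysnd_insert (cs : List Char) (t : PTrie) (w : String) (hnd : KeysND t) :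
    KeysND (insertChars t cs w) := by
  induction cs generalizing t with
  | nil =>
    intro p n hw
    cases p with
    | nil =>
      simp only [insertChars, walk, Option.some.injEq] at hw
      subst hw
      exact hnd [] t rfl
    | cons c ps =>
      simp only [insertChars, walk, kids_mk] at hw
      exact hnd (c :: ps) n (by simpa [walk] using hw)
  | cons d ds ih =>
    have hX : KeysND (insertChars (match PKids.find? t.kids d with
        | some n => n | none => PTrie.mk .nil none) ds w) := by
      apply ih
      cases hfind : PKids.find? t.kids d with
      | some n =>
        intro p m hm
        exact hnd (d :: p) m (by simpa [walk, hfind] using hm)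
      | none =>
        intro p m hm
        cases p with
        | nil => simp only [walk, Option.some.injEq] at hm; subst hm; simp [kids_mk, PKids.keys]
        | cons q qs => simp [walk, kids_mk, PKids.find?] at hm
    intro p n hw
    cases p with
    | nil =>
      simp only [insertChars, walk, Option.some.injEq] at hw
      subst hw
      simp only [kids_mk, keys_set]
      have := hnd [] t rfl
      split
      · exact this
      · rename_i hdk
        simp only [List.nodup_append]
        refine ⟨this, by simp, ?_⟩
        intro a ha b hb he
        simp only [List.mem_singleton] at hb
        subst hb; subst he
        exact hdk ha
    | cons c ps =>
      simp only [insertChars, walk, kids_mk] at hw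
      by_cases hc : c = d
      · subst hc
        rw [find?_set_self] at hw
        exact hX ps n hw
      · rw [find?_set_ne _ _ _ _ hc] at hw
        cases hfind : PKids.find? t.kids c with
        | some m =>
          rw [hfind] at hw
          exact hnd (c :: ps) n (by simpa [walk, hfind] using hw)
        | none => rw [hfind] at hw; simp at hw

-- ---- the representation invariant of the built trie ----
def TrieRep (t : PTrie) (S : List String) : Prop :=
  (∀ p c, wkids t p c ↔ ∃ u ∈ S, p ++ [c] <+: u.toList)
  ∧ (∀ p, wterm t p = if String.ofList p ∈ S then some (String.ofList p) else none)
  ∧ KeysND t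

theorem rep_insert (t : PTrie) (S : List String) (w : String) (h : TrieRep t S) :
    TrieRep (insertChars t w.toList w) (S ++ [w]) := by
  obtain ⟨hk, ht, hn⟩ := h
  refine ⟨fun p c => ?_, fun p => ?_, keysnd_insert _ _ _ hn⟩
  · by_cases hp : p <+: w.toList
    · obtain ⟨n', hw', -, hk'⟩ := insert_on w.toList t w p hp
      have : wkids (insertChars t w.toList w) p c ↔ (PKids.find? n'.kids c).isSome = true := by
        simp [wkids, hw']
      rw [this, hk' c, hk p c]
      constructor
      · rintro (⟨u, hu, hpre⟩ | hpre)
        · exact ⟨u, by simp [hu], hpre⟩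
        · exact ⟨w, by simp, hpre⟩
      · rintro ⟨u, hu, hpre⟩
        rcases List.mem_append.mp hu with hu | hu
        · exact Or.inl ⟨u, hu, hpre⟩
        · simp only [List.mem_singleton] at hu; subst hu; exact Or.inr hpre
    · have hwalk := insert_off w.toList t w p hp
      have : wkids (insertChars t w.toList w) p c ↔ wkids t p c := by
        simp [wkids, hwalk]
      rw [this, hk p c]
      constructor
      · rintro ⟨u, hu, hpre⟩; exact ⟨u, by simp [hu], hpre⟩
      · rintro ⟨u, hu, hpre⟩
        rcases List.mem_append.mp hu with hu | hu
        · exact ⟨u, hu, hpre⟩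
        · simp only [List.mem_singleton] at hu; subst hu
          exact absurd (((List.prefix_append p [c]).trans hpre)) hp
  · by_cases hp : p <+: w.toList
    · obtain ⟨n', hw', ht', -⟩ := insert_on w.toList t w p hp
      have hwt : wterm (insertChars t w.toList w) p = n'.term := by simp [wterm, hw']
      rw [hwt, ht']
      by_cases hpe : p = w.toList
      · subst hpe
        rw [if_pos rfl, if_pos (by simp [String.ofList_toList])]
        simp [String.ofList_toList]
      · rw [if_neg hpe, ht p]
        have : (String.ofList p ∈ S ++ [w]) ↔ (String.ofList p ∈ S) := by
          simp only [List.mem_append, List.mem_singleton, or_iff_left_iff_imp]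
          intro he
          exact absurd (by rw [← he]; simp) hpe
        simp only [this]
    · have hwalk := insert_off w.toList t w p hp
      have hwt : wterm (insertChars t w.toList w) p = wterm t p := by simp [wterm, hwalk]
      rw [hwt, ht p]
      have hpe : p ≠ w.toList := fun he => hp (he ▸ List.prefix_refl _)
      have : (String.ofList p ∈ S ++ [w]) ↔ (String.ofList p ∈ S) := by
        simp only [List.mem_append, List.mem_singleton, or_iff_left_iff_imp]
        intro he
        exact absurd (by rw [← he]; simp) hpe
      simp only [this]

theorem rep_empty : TrieRep (PTrie.mk .nil none) [] := by
  refine ⟨fun p c => ?_, fun p => ?_, fun p n hw => ?_⟩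
  · simp [wkids_empty]
  · simp [wterm_empty]
  · cases p with
    | nil =>
      simp only [walk, Option.some.injEq] at hw
      subst hw; simp [kids_mk, PKids.keys]
    | cons q qs => simp [walk, kids_mk, PKids.find?] at hw

theorem rep_fold (ws : List String) : ∀ (t : PTrie) (S : List String), TrieRep t S →
    TrieRep (ws.foldl (fun r w => insertChars r w.toList w) t) (S ++ ws) := by
  induction ws with
  | nil => intro t S h; simpa using h
  | cons w ws ih =>
    intro t S h
    have := ih (insertChars t w.toList w) (S ++ [w]) (rep_insert t S w h)
    simpa using this

theorem rep_buildTrie (W : List String) : TrieRep (buildTrie W) W := by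
  have := rep_fold W (PTrie.mk .nil none) [] rep_empty
  simpa [buildTrie] using this

-- ---- the per-index trigger of A's search loop, as a predicate on the word list ----
def trigb (W : List String) (w : String) (j : Nat) : Bool :=
  W.any fun u => decide (u ≠ w) && decide (u ≠ "") && (lcpN w.toList u.toList == j)

theorem trigb_iff (W : List String) (w : String) (j : Nat) :
    trigb W w j = true ↔ ∃ u ∈ W, u ≠ w ∧ u ≠ "" ∧ lcpN w.toList u.toList = j := by
  simp [trigb, List.any_eq_true, and_assoc]

theorem string_ne_empty_iff (s : String) : s ≠ "" ↔ s.toList ≠ [] := by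
  constructor
  · intro h he; exact h (String.toList_eq_nil_iff.mp he)
  · intro h he; subst he; exact h rfl

-- a node of the built trie triggers A's in-loop count update iff some other distinct
-- non-empty word value has common-prefix length exactly j with w
theorem trig_node (W : List String) (w : String) (hw : w ∈ W) (j : Nat)
    (hj : j < w.toList.length) (n : PTrie)
    (hn : walk (buildTrie W) (w.toList.take j) = some n) :
    ((1 < n.kids.size ∨ termB n = true) ↔ trigb W w j = true) := by
  obtain ⟨hk, ht, hnd⟩ := rep_buildTrie W
  set cs := w.toList with hcs
  set p := cs.take j with hp
  have hplen : p.length = j := by simp [hp, List.length_take]; omega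
  have hfind_iff : ∀ c, (PKids.find? n.kids c).isSome = true ↔ ∃ u ∈ W, p ++ [c] <+: u.toList := by
    intro c
    rw [← hk p c]
    simp only [wkids, hn, Option.some.injEq]
    constructor
    · intro h; exact ⟨n, rfl, h⟩
    · rintro ⟨m, hm, h⟩; subst hm; exact h
  have hterm : n.term = if String.ofList p ∈ W then some (String.ofList p) else none := by
    have := ht p
    simpa [wterm, hn] using this
  have hofl : (String.ofList p = "") ↔ j = 0 := by
    constructor
    · intro he
      have hpnil : p = [] := by
        have := congrArg String.toList he
        simpa using this
      rw [hpnil] at hplen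
      simpa using hplen.symm
    · intro hj0
      have hpnil : p = [] := List.length_eq_zero_iff.mp (by omega)
      simp [hpnil]
  have hterm_iff : termB n = true ↔ (String.ofList p ∈ W ∧ j ≠ 0) := by
    by_cases hmem : String.ofList p ∈ W
    · simp [termB, hterm, hmem, hofl]
    · simp [termB, hterm, hmem]
  rw [trigb_iff]
  constructor
  · rintro (hbr | htm)
    · rw [one_lt_size_iff n.kids (hnd p n hn)] at hbr
      obtain ⟨c₁, c₂, hne, h1, h2⟩ := hbr
      rw [hfind_iff] at h1 h2
      have he : cs[j]? = some cs[j] := List.getElem?_eq_getElem hj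
      -- pick the child whose edge differs from w's next character
      have key : ∀ c, c ≠ cs[j] → (∃ u ∈ W, p ++ [c] <+: u.toList) →
          ∃ u ∈ W, u ≠ w ∧ u ≠ "" ∧ lcpN cs u.toList = j := by
        intro c hcne ⟨u, huW, hpre⟩
        have hppre : p <+: u.toList := (List.prefix_append p [c]).trans hpre
        have hptake : p = u.toList.take j := by
          have := List.prefix_iff_eq_take.mp hppre
          rwa [hplen] at this
        have hulen : j + 1 ≤ u.toList.length := by
          have := hpre.length_le
          simpa [hplen] using this
        have hug : u.toList[j]? = some c := by
          have := List.prefix_iff_eq_take.mp hpre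
          rw [List.length_append, hplen, List.length_singleton, List.take_add_one, ← hptake] at this
          have h2 := List.append_cancel_left this
          cases hgu : u.toList[j]? with
          | none => rw [hgu] at h2; simp at h2
          | some x => rw [hgu] at h2; simp at h2; rw [h2]
        have hgne : cs[j]? ≠ u.toList[j]? := by
          rw [he, hug]
          intro hsome
          exact hcne (Option.some.inj hsome).symm
        have hlcp : lcpN cs u.toList = j :=
          lcpN_eq_of_ne cs u.toList j (by rw [← hp, hptake]) (by omega) (by omega) hgne
        refine ⟨u, huW, ?_, ?_, hlcp⟩
        · intro heq; subst heq; exact hgne rfl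
        · rw [string_ne_empty_iff]
          intro he0
          rw [he0] at hug; simp at hug
      by_cases hc1 : c₁ = cs[j]
      · have hc2 : c₂ ≠ cs[j] := fun h => hne (hc1.trans h.symm)
        exact key c₂ hc2 h2
      · exact key c₁ hc1 h1
    · rw [hterm_iff] at htm
      obtain ⟨hmem, hj0⟩ := htm
      refine ⟨String.ofList p, hmem, ?_, ?_, ?_⟩
      · intro he
        have : p = cs := by
          have := congrArg String.toList he
          simpa [hcs] using this
        rw [this] at hplen
        omega
      · rw [string_ne_empty_iff]
        simp only [String.toList_ofList]
        intro he0
        rw [he0] at hplen; simp at hplen; omega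
      · have : (String.ofList p).toList = p := by simp
        rw [this]
        rw [lcpN_prefix_right cs p (hp ▸ List.take_prefix j cs), hplen]
  · rintro ⟨u, huW, hunw, hune, hlcp⟩
    set us := u.toList with hus
    have htake : cs.take j = us.take j := by
      have := lcpN_take cs us
      rwa [hlcp] at this
    have hjle : j ≤ us.length := hlcp ▸ lcpN_le_right cs us
    rcases Nat.eq_or_lt_of_le hjle with hjeq | hjlt
    · -- u is exactly the length-j prefix of w: the term flag fires
      right
      rw [hterm_iff]
      have hu_eq : us = p := by
        rw [hp, htake, hjeq, List.take_length]
      constructor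
      · have : String.ofList p = u := by rw [← hu_eq, hus, String.ofList_toList]
        rwa [this]
      · intro hj0
        apply (string_ne_empty_iff u).mp hune
        have hpnil : p = [] := List.length_eq_zero_iff.mp (by omega)
        calc u.toList = us := hus.symm
          _ = p := hu_eq
          _ = [] := hpnil
    · -- u diverges from w at index j: two distinct children, the branch test fires
      left
      rw [one_lt_size_iff n.kids (hnd p n hn)]
      have hgne : cs[j]? ≠ us[j]? := by
        have := lcpN_get_ne cs us (by rw [hlcp]; omega) (by rw [hlcp]; omega)
        rwa [hlcp] at this
      have hcg : cs[j]? = some cs[j] := List.getElem?_eq_getElem hj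
      have hug : us[j]? = some (us[j]'hjlt) := List.getElem?_eq_getElem hjlt
      refine ⟨cs[j], us[j]'hjlt, ?_, ?_, ?_⟩
      · intro he
        rw [hcg, hug] at hgne
        exact hgne (by rw [he])
      · rw [hfind_iff]
        refine ⟨w, hw, ?_⟩
        rw [hp, ← hcs]
        have : cs.take j ++ [cs[j]] = cs.take (j + 1) := by
          rw [List.take_add_one, hcg]; rfl
        rw [this]
        exact List.take_prefix (j + 1) cs
      · rw [hfind_iff]
        refine ⟨u, huW, ?_⟩
        rw [hp, htake, ← hus]
        have : us.take j ++ [us[j]'hjlt] = us.take (j + 1) := by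
          rw [List.take_add_one, hug]; rfl
        rw [this]
        exact List.take_prefix (j + 1) us

-- the final `len(cur[1]) > 0` check at the word's node, as the same predicate at j = len(w)
theorem E_node (W : List String) (w : String) (hw : w ∈ W) (n : PTrie)
    (hn : walk (buildTrie W) w.toList = some n) :
    (0 < n.kids.size ↔ trigb W w w.toList.length = true) := by
  obtain ⟨hk, -, -⟩ := rep_buildTrie W
  set cs := w.toList with hcs
  have hfind_iff : ∀ c, (PKids.find? n.kids c).isSome = true ↔ ∃ u ∈ W, cs ++ [c] <+: u.toList := by
    intro c
    rw [← hk cs c]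
    simp only [wkids, hn, Option.some.injEq]
    constructor
    · intro h; exact ⟨n, rfl, h⟩
    · rintro ⟨m, hm, h⟩; subst hm; exact h
  rw [size_pos_iff, trigb_iff]
  constructor
  · rintro ⟨c, hc⟩
    rw [hfind_iff] at hc
    obtain ⟨u, huW, hpre⟩ := hc
    have hcspre : cs <+: u.toList := (List.prefix_append cs [c]).trans hpre
    have hulen : cs.length + 1 ≤ u.toList.length := by
      have := hpre.length_le
      simpa using this
    refine ⟨u, huW, ?_, ?_, lcpN_prefix_left cs u.toList hcspre⟩
    · intro he
      subst he
      rw [hcs] at hulen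
      omega
    · rw [string_ne_empty_iff]
      intro he0; rw [he0] at hulen; simp at hulen
  · rintro ⟨u, huW, hunw, hune, hlcp⟩
    set us := u.toList with hus
    have hjle : cs.length ≤ us.length := hlcp ▸ lcpN_le_right cs us
    have htake : cs = us.take cs.length := by
      have := lcpN_take cs us
      rw [hlcp, List.take_length] at this
      exact this
    have hjlt : cs.length < us.length := by
      rcases Nat.eq_or_lt_of_le hjle with he | h
      · exfalso
        apply hunw
        have : us = cs := by rw [htake, he, List.take_length]
        have h2 := congrArg String.ofList this
        rwa [hus, hcs, String.ofList_toList, String.ofList_toList] at h2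
      · exact h
    refine ⟨us[cs.length]'hjlt, ?_⟩
    rw [hfind_iff]
    refine ⟨u, huW, ?_⟩
    have hug : us[cs.length]? = some (us[cs.length]'hjlt) := List.getElem?_eq_getElem hjlt
    have : cs ++ [us[cs.length]'hjlt] = us.take (cs.length + 1) := by
      conv_rhs => rw [List.take_add_one, hug]
      rw [← htake]
      rfl
    rw [← hus, this]
    exact List.take_prefix _ us

-- ---- A's search loop, reduced to a fold over the trigger predicate ----
theorem searchGo_out (W : List String) (w : String) (hw : w ∈ W) (wlen : Int)
    (hE : trigb W w w.toList.length = true) :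
    ∀ (suffix : List Char) (i : Nat) (cnt : Int) (cur : PTrie),
      suffix = w.toList.drop i → i ≤ w.toList.length →
      walk (buildTrie W) (w.toList.take i) = some cur →
      searchGo cur i cnt wlen suffix = wlen := by
  intro suffix
  induction suffix with
  | nil =>
    intro i cnt cur hs hi hwalk
    have hieq : i = w.toList.length := by
      have h0 := congrArg List.length hs
      rw [List.length_drop] at h0
      simp only [List.length_nil] at h0
      omega
    subst hieq
    rw [List.take_length] at hwalk
    have := (E_node W w hw cur hwalk).mpr hE
    simp [searchGo, this]
  | cons c rest ih =>
    intro i cnt cur hs hi hwalk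
    have hget : w.toList[i]? = some c := by
      rw [← List.head?_drop, ← hs]; rfl
    have hilt : i < w.toList.length := List.getElem?_eq_some_iff.mp hget |>.1
    obtain ⟨hk, -, -⟩ := rep_buildTrie W
    have hsome : (PKids.find? cur.kids c).isSome = true := by
      have : wkids (buildTrie W) (w.toList.take i) c := by
        rw [hk]
        refine ⟨w, hw, ?_⟩
        have : w.toList.take i ++ [c] = w.toList.take (i + 1) := by
          rw [List.take_add_one, hget]; rfl
        rw [this]
        exact List.take_prefix _ _
      obtain ⟨m, hm, hf⟩ := this
      rw [hwalk] at hm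
      injection hm with hm
      subst hm
      exact hf
    obtain ⟨nx, hnx⟩ := Option.isSome_iff_exists.mp hsome
    have hwalk' : walk (buildTrie W) (w.toList.take (i + 1)) = some nx := by
      have : w.toList.take (i + 1) = w.toList.take i ++ [c] := by
        rw [List.take_add_one, hget]; rfl
      rw [this, walk_snoc, hwalk]
      simpa using hnx
    have hrest : rest = w.toList.drop (i + 1) := by
      have h1 : w.toList.drop (i + 1) = (w.toList.drop i).tail := by
        rw [← List.drop_drop]
        simp
      rw [h1, ← hs]
      rfl
    simp only [searchGo, hnx]
    exact ih (i + 1) _ nx hrest (by omega) hwalk'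

theorem searchGo_in (W : List String) (w : String) (hw : w ∈ W) (wlen : Int)
    (hE : trigb W w w.toList.length = false) :
    ∀ (suffix : List Char) (i : Nat) (cnt : Int) (cur : PTrie),
      suffix = w.toList.drop i → i ≤ w.toList.length →
      walk (buildTrie W) (w.toList.take i) = some cur →
      searchGo cur i cnt wlen suffix =
        (List.range' i (w.toList.length - i)).foldl
          (fun a j => if trigb W w j then (j : Int) + 1 else a) cnt := by
  intro suffix
  induction suffix with
  | nil =>
    intro i cnt cur hs hi hwalk
    have hieq : i = w.toList.length := by
      have h0 := congrArg List.length hs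
      rw [List.length_drop] at h0
      simp only [List.length_nil] at h0
      omega
    subst hieq
    rw [List.take_length] at hwalk
    have hsz : ¬ (0 < cur.kids.size) := by
      rw [E_node W w hw cur hwalk, hE]
      simp
    simp [searchGo, hsz]
  | cons c rest ih =>
    intro i cnt cur hs hi hwalk
    have hget : w.toList[i]? = some c := by
      rw [← List.head?_drop, ← hs]; rfl
    have hilt : i < w.toList.length := List.getElem?_eq_some_iff.mp hget |>.1
    obtain ⟨hk, -, -⟩ := rep_buildTrie W
    have hsome : (PKids.find? cur.kids c).isSome = true := by
      have : wkids (buildTrie W) (w.toList.take i) c := by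
        rw [hk]
        refine ⟨w, hw, ?_⟩
        have : w.toList.take i ++ [c] = w.toList.take (i + 1) := by
          rw [List.take_add_one, hget]; rfl
        rw [this]
        exact List.take_prefix _ _
      obtain ⟨m, hm, hf⟩ := this
      rw [hwalk] at hm
      injection hm with hm
      subst hm
      exact hf
    obtain ⟨nx, hnx⟩ := Option.isSome_iff_exists.mp hsome
    have hwalk' : walk (buildTrie W) (w.toList.take (i + 1)) = some nx := by
      have : w.toList.take (i + 1) = w.toList.take i ++ [c] := by
        rw [List.take_add_one, hget]; rfl
      rw [this, walk_snoc, hwalk]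
      simpa using hnx
    have hrest : rest = w.toList.drop (i + 1) := by
      have h1 : w.toList.drop (i + 1) = (w.toList.drop i).tail := by
        rw [← List.drop_drop]
        simp
      rw [h1, ← hs]
      rfl
    have hlen : w.toList.length - i = (w.toList.length - (i + 1)) + 1 := by omega
    rw [hlen, List.range'_succ]
    simp only [searchGo, hnx, List.foldl_cons]
    have htrig := trig_node W w hw i hilt cur hwalk
    have hcnt2 : (if termB cur = true then (i : Int) + 1
        else if 1 < cur.kids.size then (i : Int) + 1 else cnt) =
        (if trigb W w i then (i : Int) + 1 else cnt) := by
      by_cases h : trigb W w i = true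
      · rw [if_pos h]
        rcases htrig.mpr h with hb | ht
        · split_ifs <;> rfl
        · rw [if_pos ht]
      · have hb : ¬ 1 < cur.kids.size := fun hb => h (htrig.mp (Or.inl hb))
        have ht : ¬ termB cur = true := fun ht => h (htrig.mp (Or.inr ht))
        rw [if_neg h, if_neg ht, if_neg hb]
    rw [hcnt2]
    exact ih (i + 1) _ nx hrest (by omega) hwalk'

-- ---- generic facts about the last-trigger fold and B's running-max fold ----
theorem fold_trig_none (t : Nat → Bool) :
    ∀ (m i : Nat) (cnt : Int), (∀ j, i ≤ j → j < i + m → t j = false) →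
      (List.range' i m).foldl (fun a j => if t j then (j : Int) + 1 else a) cnt = cnt := by
  intro m
  induction m with
  | zero => intro i cnt h; rfl
  | succ m ih =>
    intro i cnt h
    rw [List.range'_succ, List.foldl_cons, if_neg (by simp [h i (le_refl i) (by omega)])]
    exact ih (i + 1) cnt (fun j h1 h2 => h j (by omega) (by omega))

theorem fold_trig_last (t : Nat → Bool) :
    ∀ (m i : Nat) (cnt : Int) (k : Nat), i ≤ k → k < i + m → t k = true →
      (∀ j, k < j → j < i + m → t j = false) →
      (List.range' i m).foldl (fun a j => if t j then (j : Int) + 1 else a) cnt = (k : Int) + 1 := by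
  intro m
  induction m with
  | zero => intro i cnt k h1 h2; omega
  | succ m ih =>
    intro i cnt k h1 h2 hk hafter
    rw [List.range'_succ, List.foldl_cons]
    rcases Nat.eq_or_lt_of_le h1 with he | hlt
    · subst he
      rw [if_pos hk]
      exact fold_trig_none t m (i + 1) _ (fun j ha hb => hafter j (by omega) (by omega))
    · exact ih (i + 1) _ k hlt (by omega) hk (fun j ha hb => hafter j (by omega) (by omega))

-- B's inner fold, named for the proofs
def bestOf (others : List String) (w : String) : Int :=
  others.foldl
    (fun best u =>
      if u ≠ w then
        let l := lcpRec w.toList u.toList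
        if best < l then l else best
      else best) (-1)

theorem bfold_le (w : String) (L : List String) :
    ∀ init : Int, init ≤ L.foldl
      (fun best u => if u ≠ w then
        (let l := lcpRec w.toList u.toList; if best < l then l else best) else best) init := by
  induction L with
  | nil => intro init; exact le_refl _
  | cons v vs ih =>
    intro init
    refine le_trans ?_ (ih _)
    dsimp only
    split_ifs <;> omega

theorem bfold_ge (w : String) (L : List String) (u : String) (hu : u ∈ L) (hne : u ≠ w) :
    ∀ init : Int, lcpRec w.toList u.toList ≤ L.foldl
      (fun best u => if u ≠ w then
        (let l := lcpRec w.toList u.toList; if best < l then l else best) else best) init := by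
  induction L with
  | nil => simp at hu
  | cons v vs ih =>
    intro init
    rcases List.mem_cons.mp hu with he | hm
    · subst he
      refine le_trans ?_ (bfold_le w vs _)
      dsimp only
      rw [if_pos (by simpa using hne)]
      split_ifs <;> omega
    · exact ih hm _

theorem bfold_cases (w : String) (L : List String) :
    ∀ init : Int, (L.foldl
      (fun best u => if u ≠ w then
        (let l := lcpRec w.toList u.toList; if best < l then l else best) else best) init = init)
      ∨ ∃ u ∈ L, u ≠ w ∧ L.foldl
      (fun best u => if u ≠ w then
        (let l := lcpRec w.toList u.toList; if best < l then l else best) else best) init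
        = lcpRec w.toList u.toList := by
  induction L with
  | nil => intro init; exact Or.inl rfl
  | cons v vs ih =>
    intro init
    rcases ih (if v ≠ w then
        (let l := lcpRec w.toList v.toList; if init < l then l else init) else init) with h | ⟨u, hu, hune, h⟩
    · dsimp only at h
      by_cases hv : v = w
      · rw [List.foldl_cons]
        left
        simpa [hv] using h
      · rw [List.foldl_cons]
        dsimp only
        rw [if_pos (by simpa using hv)] at h ⊢
        by_cases hl : init < lcpRec w.toList v.toList
        · right
          exact ⟨v, by simp, hv, by rw [if_pos hl] at h ⊢; exact h⟩
        · left
          rw [if_neg hl] at h ⊢; exact h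
    · right
      exact ⟨u, by simp [hu], hune, by rw [List.foldl_cons]; exact h⟩

theorem mem_others_iff (W : List String) (u : String) :
    u ∈ PySem.Set.diff (PySem.Set.ofList W) [""] ↔ u ∈ W ∧ u ≠ "" := by
  rw [PySem.Set.mem_diff, PySem.Set.mem_ofList]
  simp

-- ---- per-word agreement of the two programs ----
theorem perWord (W : List String) (w : String) (hw : w ∈ W) :
    searchGo (buildTrie W) 0 0 (PySem.Str.len w) w.toList =
      min (PySem.Str.len w) (bestOf (PySem.Set.diff (PySem.Set.ofList W) [""]) w + 1) := by
  set others := PySem.Set.diff (PySem.Set.ofList W) [""] with hoth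
  set best := bestOf others w with hbest
  have hwlen : PySem.Str.len w = (w.toList.length : Int) := PySem.Str.len_eq w
  have hbest_le : ∀ u ∈ W, u ≠ w → u ≠ "" → lcpRec w.toList u.toList ≤ best := by
    intro u huW hune hue
    exact bfold_ge w others u ((mem_others_iff W u).mpr ⟨huW, hue⟩) hune (-1)
  have hbest_cases : best = -1 ∨ ∃ u ∈ W, u ≠ w ∧ u ≠ "" ∧ best = lcpRec w.toList u.toList := by
    rcases bfold_cases w others (-1) with h | ⟨u, hu, hune, h⟩
    · exact Or.inl h
    · right
      obtain ⟨huW, hue⟩ := (mem_others_iff W u).mp hu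
      exact ⟨u, huW, hune, hue, h⟩
  have hs0 : w.toList = w.toList.drop 0 := rfl
  have hw0 : walk (buildTrie W) (w.toList.take 0) = some (buildTrie W) := rfl
  by_cases hE : trigb W w w.toList.length = true
  · rw [searchGo_out W w hw (PySem.Str.len w) hE w.toList 0 0 (buildTrie W) hs0 (by omega) hw0]
    obtain ⟨u, huW, hune, hue, hlcp⟩ := (trigb_iff W w _).mp hE
    have h1 : lcpRec w.toList u.toList ≤ best := hbest_le u huW hune hue
    rw [lcpRec_eq, hlcp] at h1
    rw [hwlen]
    omega
  · rw [searchGo_in W w hw (PySem.Str.len w) (by simpa using hE) w.toList 0 0 (buildTrie W) hs0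
      (by omega) hw0]
    simp only [Nat.sub_zero]
    by_cases hex : ∃ u ∈ W, u ≠ w ∧ u ≠ ""
    · obtain ⟨u0, hu0W, hu0ne, hu0e⟩ := hex
      have hge0 : (0 : Int) ≤ best := le_trans (lcpRec_nonneg _ _) (hbest_le u0 hu0W hu0ne hu0e)
      rcases hbest_cases with h | ⟨u1, hu1W, hu1ne, hu1e, h⟩
      · omega
      · set k := lcpN w.toList u1.toList with hk
        have hbk : best = (k : Int) := by rw [h, lcpRec_eq]
        have hkle : k ≤ w.toList.length := lcpN_le_left _ _
        have hklt : k < w.toList.length := by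
          rcases Nat.eq_or_lt_of_le hkle with he | h2
          · exfalso
            apply hE
            rw [trigb_iff]
            exact ⟨u1, hu1W, hu1ne, hu1e, by rw [← hk, he]⟩
          · exact h2
        have htk : trigb W w k = true := by
          rw [trigb_iff]; exact ⟨u1, hu1W, hu1ne, hu1e, rfl⟩
        have hafter : ∀ j, k < j → j < 0 + w.toList.length → trigb W w j = false := by
          intro j hj1 hj2
          by_contra hc
          rw [Bool.not_eq_false, trigb_iff] at hc
          obtain ⟨u2, hu2W, hu2ne, hu2e, hlcp2⟩ := hc
          have := hbest_le u2 hu2W hu2ne hu2e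
          rw [lcpRec_eq, hlcp2, hbk] at this
          have : j ≤ k := by exact_mod_cast this
          omega
        rw [fold_trig_last (trigb W w) w.toList.length 0 0 k (by omega) (by omega) htk hafter]
        rw [hwlen, hbk]
        omega
    · have hex' : ∀ u ∈ W, u ≠ w → u = "" := by
        intro u huW hune
        by_contra hne
        exact hex ⟨u, huW, hune, hne⟩
      have hnone : ∀ j, 0 ≤ j → j < 0 + w.toList.length → trigb W w j = false := by
        intro j h1 h2
        by_contra hc
        rw [Bool.not_eq_false, trigb_iff] at hc
        obtain ⟨u, huW, hune, hue, -⟩ := hc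
        exact hue (hex' u huW hune)
      rw [fold_trig_none (trigb W w) w.toList.length 0 0 hnone]
      have hb1 : best = -1 := by
        rcases hbest_cases with h | ⟨u, huW, hune, hue, -⟩
        · exact h
        · exact absurd (hex' u huW hune) hue
      rw [hwlen, hb1]
      have : (0 : Int) ≤ (w.toList.length : Int) := by positivity
      omega

theorem foldl_add_congr (f g : String → Int) (L : List String) (h : ∀ x ∈ L, f x = g x) :
    ∀ a : Int, L.foldl (fun s x => s + f x) a = L.foldl (fun s x => s + g x) a := by
  induction L with
  | nil => intro a; rfl
  | cons x xs ih =>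
    intro a
    rw [List.foldl_cons, List.foldl_cons, h x (by simp)]
    exact ih (fun y hy => h y (by simp [hy])) _

-- ===== VERDICT (by name: the statement is the Claim_ definition above) =====
theorem solution_spec : Claim_equal_solution := by
  intro words _
  unfold Spec_solution solution solution_alt
  have halt : ∀ w ∈ words,
      (fun w => searchGo (buildTrie words) 0 0 (PySem.Str.len w) w.toList) w =
      (fun w => min (PySem.Str.len w)
        (bestOf (PySem.Set.diff (PySem.Set.ofList words) [""]) w + 1)) w :=
    fun w hw => perWord words w hw
  have := foldl_add_congr _ _ words halt 0
  simpa [bestOf] using this
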